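-- pv_equiv track=rewrite | github.com/NujjA/Tech-Interview-Practice | solutions.py | question1
-- ===== SOURCE A (Python) =====
-- def question1(s, t):
--     '''Given two strings s and t, determine whether some anagram of t
--     is a substring of s. For example: if s = "udacity" and t = "ad",
--     then the function returns True. Your function definition should
--     look like: question1(s, t) and return a boolean True or False.'''
--
--     # If s does not exist, we can find our answer immediately
--     if (not s):
--         if(t):
--             return False
--         else:
--             return True
--
--     # Loop through the letters in t
--     while(t):
--         index = s.find(t[0])
--         # If a letter in t can not be found, we know the answer is False
--         if (index == -1):
--             return False
--         else:
--             # Found a matching letter, remove from t and s and keep looking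
--             t = t[1:]
--             s = s[:index]+s[index+1:]
--
--     # All the letters in t have been accounted for, so the answer is True
--     return True
-- ===== SOURCE B (Python) =====
-- def question1(s, t):
--     counts = {}
--     for c in s:
--         counts[c] = counts.get(c, 0) + 1
--     for c in t:
--         n = counts.get(c, 0)
--         if n <= 0:
--             return False
--         counts[c] = n - 1
--     return True
-- ===== Notes on version B (the rewrite author's own statement) =====
-- stated objective: faster
-- what changed: Replaces A's repeated find-and-slice rebuilding of s for each character of t with a single frequency-table build over s followed by one decrementing pass over t.
import Mathlib
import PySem

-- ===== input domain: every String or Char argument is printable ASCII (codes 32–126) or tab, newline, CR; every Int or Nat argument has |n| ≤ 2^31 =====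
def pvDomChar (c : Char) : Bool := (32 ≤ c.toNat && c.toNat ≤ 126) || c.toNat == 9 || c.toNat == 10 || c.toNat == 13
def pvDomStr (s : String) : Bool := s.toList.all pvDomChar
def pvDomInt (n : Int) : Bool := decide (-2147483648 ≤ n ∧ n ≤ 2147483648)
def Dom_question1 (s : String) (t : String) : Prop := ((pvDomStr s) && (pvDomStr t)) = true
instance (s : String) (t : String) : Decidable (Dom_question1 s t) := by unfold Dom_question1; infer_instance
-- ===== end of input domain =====

-- B builds a character-frequency table of s once and makes one decrementing pass
-- over t, instead of A's repeated find-and-slice rebuilding of s per character of t.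

-- ===== PORT A =====
-- while(t): index = s.find(t[0]); if index == -1: return False
--           else: t = t[1:]; s = s[:index] + s[index+1:]
def question1LoopA : List Char → List Char → Bool
  | _, [] => true
  | s, c :: rest =>
    match s.findIdx? (· == c) with
    | none => false
    | some i => question1LoopA (s.take i ++ s.drop (i + 1)) rest

def question1 (s : String) (t : String) : Bool :=
  if s.toList = [] then
    (if t.toList ≠ [] then false else true)
  else
    question1LoopA s.toList t.toList

-- ===== PORT B =====
def question1Count (s : List Char) : PySem.Dict Char Int :=
  s.foldl (fun d c => d.insert c (d.getD c 0 + 1)) PySem.Dict.empty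

def question1ScanB : PySem.Dict Char Int → List Char → Bool
  | _, [] => true
  | d, c :: rest =>
    let n := d.getD c 0
    if n ≤ 0 then false else question1ScanB (d.insert c (n - 1)) rest

def question1_alt (s : String) (t : String) : Bool :=
  question1ScanB (question1Count s.toList) t.toList

-- ===== PRECONDITION & SPEC =====
def Spec_question1 (s : String) (t : String) (out : Bool) : Prop := out = question1_alt s t
instance (s : String) (t : String) (out : Bool) : Decidable (Spec_question1 s t out) := by unfold Spec_question1; infer_instance

-- ===== CLAIM (what is proved, stated in full; the proofs are below) =====
def Claim_equal_question1 : Prop := ∀ (s : String) (t : String), Dom_question1 s t → Spec_question1 s t (question1 s t)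

-- ===== LEMMAS AND PROOFS =====

-- s.take i ++ s.drop (i+1), i the first index of c, is exactly s.erase c (and c ∈ s)
theorem question1_erase_of_findIdx? :
    ∀ (s : List Char) (c : Char) (i : Nat), s.findIdx? (· == c) = some i →
      c ∈ s ∧ s.take i ++ s.drop (i + 1) = s.erase c := by
  intro s
  induction s with
  | nil => intro c i h; simp at h
  | cons a s ih =>
    intro c i h
    rw [List.findIdx?_cons] at h
    by_cases hac : a = c
    · subst hac
      simp at h
      subst h
      simp
    · have hne : (a == c) = false := by simp [hac]
      simp [hne] at h
      obtain ⟨j, hj, hij⟩ := h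
      obtain ⟨hmem, heq⟩ := ih c j hj
      subst hij
      constructor
      · exact List.mem_cons_of_mem _ hmem
      · simp [hne, heq]

-- characterisation of A's loop: sub-multiset of remaining s
theorem question1LoopA_iff :
    ∀ (t s : List Char), question1LoopA s t = true ↔ ∀ x, t.count x ≤ s.count x := by
  intro t
  induction t with
  | nil => intro s; simp [question1LoopA]
  | cons c rest ih =>
    intro s
    simp only [question1LoopA]
    cases hf : s.findIdx? (· == c) with
    | none =>
      have hc : c ∉ s := by
        intro hmem
        have := List.findIdx?_eq_none_iff.mp hf c hmem
        simp at this
      simp only [Bool.false_eq_true, false_iff]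
      intro h
      have := h c
      have h0 : s.count c = 0 := List.count_eq_zero.mpr hc
      simp [h0] at this
    | some i =>
      obtain ⟨hmem, heq⟩ := question1_erase_of_findIdx? s c i hf
      dsimp only
      rw [heq, ih]
      have h1 : 1 ≤ s.count c := List.one_le_count_iff.mpr hmem
      constructor
      · intro h x
        have hx2 := h x
        rw [List.count_erase] at hx2
        rw [List.count_cons]
        by_cases hx : x = c
        · subst hx; simp at hx2 ⊢; omega
        · simp [Ne.symm hx] at hx2 ⊢; omega
      · intro h x
        have hx2 := h x
        rw [List.count_cons] at hx2
        rw [List.count_erase]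
        by_cases hx : x = c
        · subst hx; simp at hx2 ⊢; omega
        · simp [Ne.symm hx] at hx2 ⊢; omega

-- characterisation of B's scan over a nonnegative table
theorem question1ScanB_iff :
    ∀ (t : List Char) (d : PySem.Dict Char Int), (∀ x, 0 ≤ d.getD x 0) →
      (question1ScanB d t = true ↔ ∀ x, (t.count x : Int) ≤ d.getD x 0) := by
  intro t
  induction t with
  | nil => intro d hd; simpa [question1ScanB] using hd
  | cons c rest ih =>
    intro d hd
    simp only [question1ScanB]
    by_cases hn : d.getD c 0 ≤ 0
    · simp only [hn, if_true, Bool.false_eq_true, false_iff]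
      intro h
      have := h c
      rw [List.count_cons] at this
      simp at this
      omega
    · simp only [hn, if_false]
      have hd' : ∀ x, 0 ≤ (d.insert c (d.getD c 0 - 1)).getD x 0 := by
        intro x
        rw [PySem.Dict.getD_insert]
        by_cases hx : x = c
        · simp [hx]; omega
        · simp [hx]; exact hd x
      rw [ih _ hd']
      constructor
      · intro h x
        have hx2 := h x
        rw [PySem.Dict.getD_insert] at hx2
        rw [List.count_cons]
        by_cases hx : x = c
        · subst hx; simp at hx2 ⊢; omega
        · simp [hx, Ne.symm hx] at hx2 ⊢; omega
      · intro h x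
        have hx2 := h x
        rw [List.count_cons] at hx2
        rw [PySem.Dict.getD_insert]
        by_cases hx : x = c
        · subst hx; simp at hx2 ⊢; omega
        · simp [hx, Ne.symm hx] at hx2 ⊢; omega

theorem question1_alt_iff (s t : String) :
    question1_alt s t = true ↔ ∀ x, t.toList.count x ≤ s.toList.count x := by
  unfold question1_alt question1Count
  rw [PySem.Dict.foldl_insert_getD_add_one_eq_counter]
  rw [question1ScanB_iff _ _ (by intro x; rw [PySem.Dict.getD_counter]; positivity)]
  constructor
  · intro h x
    have := h x
    rw [PySem.Dict.getD_counter] at this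
    exact_mod_cast this
  · intro h x
    rw [PySem.Dict.getD_counter]
    exact_mod_cast h x

-- ===== VERDICT (by name: the statement is the Claim_ definition above) =====
theorem question1_spec : Claim_equal_question1 := by
  intro s t _
  unfold Spec_question1
  rw [Bool.eq_iff_iff, question1_alt_iff]
  unfold question1
  by_cases hs : s.toList = []
  · simp only [hs, if_true]
    by_cases ht : t.toList = []
    · simp [ht]
    · simp only [ht, ne_eq, not_false_iff, if_true, Bool.false_eq_true, false_iff]
      intro h
      obtain ⟨c, hc⟩ := List.exists_mem_of_ne_nil _ ht
      have := h c
      have h1 : 1 ≤ t.toList.count c := List.one_le_count_iff.mpr hc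
      simp at this
      omega
  · simp only [hs, if_false]
    exact question1LoopA_iff t.toList s.toList
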